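-- pv_equiv track=rewrite | github.com/HarshalM22/URL-Resolver | resolver/match.py | convert_text_to_json
-- ===== SOURCE A (Python) =====
-- def convert_text_to_json(raw_text):
--     # If CMSClient already parsed it, return directly
--     if isinstance(raw_text, list):
--         return raw_text
--
--     if not isinstance(raw_text, str):
--         raise TypeError(f"Expected str or list, got {type(raw_text)}")
--
--     lines = [
--         line.strip()
--         for line in raw_text.split("\n")
--         if line.strip()
--     ]
--
--     results = []
--     current_entry = {}
--
--     for line in lines:
--         if ":" in line:
--             key, value = line.split(":", 1)
--             key, value = key.strip(), value.strip()
--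
--             if key == "location-name":
--                 if current_entry:
--                     results.append(current_entry)
--                 current_entry = {key: value}
--             else:
--                 current_entry[key] = value
--
--     if current_entry:
--         results.append(current_entry)
--
--     return results
-- ===== SOURCE B (Python) =====
-- def _extract(st):
--     k, v = st.split(":", 1)
--     return (k.strip(), v.strip())
--
--
-- def convert_text_to_json(raw_text):
--     # Two-pass re-implementation: parse lines into (key, value) pairs first,
--     # then group the pairs into segments (plain lists), converting each
--     # non-empty segment to a dict only at the end.
--     if isinstance(raw_text, list):
--         return raw_text
--
--     if not isinstance(raw_text, str):
--         raise TypeError(f"Expected str or list, got {type(raw_text)}")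
--
--     pairs = []
--     for line in raw_text.split("\n"):
--         st = line.strip()
--         if ":" in st:
--             pairs.append(_extract(st))
--
--     groups = [[]]
--     for kv in pairs:
--         if kv[0] == "location-name":
--             groups.append([kv])
--         else:
--             groups[-1].append(kv)
--
--     return [dict(g) for g in groups if g]
-- ===== Notes on version B (the rewrite author's own statement) =====
-- stated objective: alternative
-- what changed: A fuses parsing and grouping in one stateful loop that mutates a current dict; B first parses all lines into a flat list of (key, value) pairs, then groups the pairs into list segments split at each group-starting key, converting each non-empty segment to a dict only at the end.
import Mathlib
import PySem

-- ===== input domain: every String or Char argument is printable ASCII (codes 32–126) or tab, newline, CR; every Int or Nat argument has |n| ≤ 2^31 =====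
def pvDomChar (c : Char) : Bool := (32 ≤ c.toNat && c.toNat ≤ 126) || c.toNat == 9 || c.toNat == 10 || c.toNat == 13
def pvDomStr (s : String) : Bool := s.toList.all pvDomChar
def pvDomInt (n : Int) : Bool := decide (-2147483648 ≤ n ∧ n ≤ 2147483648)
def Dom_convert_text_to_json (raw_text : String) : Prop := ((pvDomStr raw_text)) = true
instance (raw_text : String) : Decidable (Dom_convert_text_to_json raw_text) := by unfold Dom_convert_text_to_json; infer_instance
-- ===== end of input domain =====

-- B changes the decomposition (a parse pass into (key, value) pairs, then segment grouping with a final dict conversion); same values, no speed claim.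

-- ===== PORT A =====
-- shared parsing helper: key/value extraction from a line containing ':' (k.strip(), v.strip() of line.split(":", 1))
def pvExtract (l : String) : String × String :=
  let parts := (PySem.Str.splitMax? l ":" 1).getD []
  (PySem.Str.strip (parts.getD 0 ""), PySem.Str.strip (parts.getD 1 ""))

-- A's loop body after the key/value extraction: grouping on a (results, current_entry) dict state
def pvStep (acc : List (PySem.Dict String String) × PySem.Dict String String)
    (kv : String × String) : List (PySem.Dict String String) × PySem.Dict String String :=
  if kv.1 == "location-name" then
    (if acc.2.items.isEmpty then acc.1 else acc.1 ++ [acc.2], PySem.Dict.empty.insert kv.1 kv.2)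
  else (acc.1, acc.2.insert kv.1 kv.2)

-- A: one fused loop over the stripped non-empty lines, maintaining (results, current_entry : dict)
def convert_text_to_json (raw_text : String) : List (List (String × String)) :=
  let lines := (((PySem.Str.split? raw_text "\n").getD []).map PySem.Str.strip).filter (fun l => l != "")
  let st := lines.foldl
    (fun acc line => if PySem.Str.isIn ":" line then pvStep acc (pvExtract line) else acc)
    ([], PySem.Dict.empty)
  (if st.2.items.isEmpty then st.1 else st.1 ++ [st.2]).map (fun d => d.items)

-- ===== PORT B =====
-- B's grouping step: start a new segment at 'location-name', else append to the last segment
def pvBStep (gs : List (List (String × String))) (kv : String × String) :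
    List (List (String × String)) :=
  if kv.1 == "location-name" then gs ++ [[kv]]
  else gs.dropLast ++ [gs.getLast! ++ [kv]]

-- B: pass 1 collects (key, value) pairs; pass 2 groups them into list segments; dicts only at the end
def convert_text_to_json_alt (raw_text : String) : List (List (String × String)) :=
  let pairs := ((PySem.Str.split? raw_text "\n").getD []).foldl
    (fun (acc : List (String × String)) line =>
      let st := PySem.Str.strip line
      if PySem.Str.isIn ":" st then acc ++ [pvExtract st] else acc) []
  let groups := pairs.foldl pvBStep [[]]
  (groups.filter (fun g => !g.isEmpty)).map (fun g => (PySem.Dict.ofList g).items)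

-- ===== PRECONDITION & SPEC =====
def Spec_convert_text_to_json (raw_text : String) (out : List (List (String × String))) : Prop := out = convert_text_to_json_alt raw_text
instance (raw_text : String) (out : List (List (String × String))) : Decidable (Spec_convert_text_to_json raw_text out) := by unfold Spec_convert_text_to_json; infer_instance

-- ===== CLAIM (what is proved, stated in full; the proofs are below) =====
def Claim_equal_convert_text_to_json : Prop := ∀ (raw_text : String), Dom_convert_text_to_json raw_text → Spec_convert_text_to_json raw_text (convert_text_to_json raw_text)

-- ===== LEMMAS AND PROOFS =====

-- A's trailing append of the current entry, then dict → items
def pvFinal (st : List (PySem.Dict String String) × PySem.Dict String String) :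
    List (List (String × String)) :=
  (if st.2.items.isEmpty then st.1 else st.1 ++ [st.2]).map (fun d => d.items)

theorem pv_ofList_append (g : List (String × String)) (kv : String × String) :
    PySem.Dict.ofList (g ++ [kv]) = (PySem.Dict.ofList g).insert kv.1 kv.2 := by
  simp [PySem.Dict.ofList, PySem.Dict.update, List.foldl_append]

theorem pv_insert_items_ne (d : PySem.Dict String String) (k v : String) :
    (d.insert k v).items ≠ [] := by
  rw [PySem.Dict.insert]
  split
  · rename_i h
    intro hnil
    simp only [List.map_eq_nil_iff] at hnil
    rw [PySem.Dict.contains] at h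
    simp [hnil] at h
  · simp

theorem pv_foldl_insert_items_ne (t : List (String × String)) :
    ∀ (d : PySem.Dict String String), d.items ≠ [] →
    (t.foldl (fun acc p => acc.insert p.1 p.2) d).items ≠ [] := by
  induction t with
  | nil => intro d h; simpa using h
  | cons x t ih =>
    intro d h
    rw [List.foldl_cons]
    exact ih _ (pv_insert_items_ne d x.1 x.2)

theorem pv_ofList_items_empty (g : List (String × String)) :
    (PySem.Dict.ofList g).items.isEmpty = g.isEmpty := by
  cases g with
  | nil => rfl
  | cons x t =>
    simp only [List.isEmpty_cons]
    rw [List.isEmpty_eq_false_iff]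
    rw [PySem.Dict.ofList, PySem.Dict.update, List.foldl_cons]
    exact pv_foldl_insert_items_ne t _ (pv_insert_items_ne PySem.Dict.empty x.1 x.2)

theorem pv_filter_singleton (g : List (String × String)) (hg : g ≠ []) :
    List.filter (fun x => !x.isEmpty) [g] = [g] := by
  have hne : g.isEmpty = false := by simpa using hg
  simp [hne]

-- the grouping folds agree (A's dict-state loop vs B's list-segment loop), for any aligned states
theorem pv_group_eq (ps : List (String × String)) :
    ∀ (gs : List (List (String × String))) (g : List (String × String)),
    pvFinal (ps.foldl pvStep
        (((gs.filter (fun x => !x.isEmpty)).map PySem.Dict.ofList), PySem.Dict.ofList g))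
    = ((ps.foldl pvBStep (gs ++ [g])).filter (fun x => !x.isEmpty)).map
        (fun x => (PySem.Dict.ofList x).items) := by
  induction ps with
  | nil =>
    intro gs g
    simp only [List.foldl_nil, pvFinal]
    rw [List.filter_append]
    by_cases hg : g = []
    · subst hg
      simp [pv_ofList_items_empty]
    · have h1 : (PySem.Dict.ofList g).items.isEmpty = false := by
        rw [pv_ofList_items_empty]; simpa using hg
      simp [h1, pv_filter_singleton g hg]
  | cons kv ps ih =>
    obtain ⟨k, v⟩ := kv
    intro gs g
    simp only [List.foldl_cons]
    by_cases hk : k = "location-name"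
    · subst hk
      have h1 : pvStep (((gs.filter (fun x => !x.isEmpty)).map PySem.Dict.ofList),
          PySem.Dict.ofList g) ("location-name", v)
          = ((((gs ++ [g]).filter (fun x => !x.isEmpty)).map PySem.Dict.ofList),
             PySem.Dict.ofList [("location-name", v)]) := by
        simp only [pvStep, beq_self_eq_true, if_true, List.filter_append, List.map_append]
        by_cases hg : g = []
        · subst hg
          refine Prod.ext ?_ rfl
          simp [pv_ofList_items_empty]
        · have he : (PySem.Dict.ofList g).items.isEmpty = false := by
            rw [pv_ofList_items_empty]; simpa using hg
          refine Prod.ext ?_ rfl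
          simp [he, pv_filter_singleton g hg]
      have h2 : pvBStep (gs ++ [g]) ("location-name", v) = (gs ++ [g]) ++ [[("location-name", v)]] := by
        simp [pvBStep]
      rw [h1, h2]
      exact ih (gs ++ [g]) [("location-name", v)]
    · have hbk : (k == "location-name") = false := by simpa using hk
      have h1 : pvStep (((gs.filter (fun x => !x.isEmpty)).map PySem.Dict.ofList),
          PySem.Dict.ofList g) (k, v)
          = (((gs.filter (fun x => !x.isEmpty)).map PySem.Dict.ofList),
             PySem.Dict.ofList (g ++ [(k, v)])) := by
        simp [pvStep, hbk, pv_ofList_append]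
      have h2 : pvBStep (gs ++ [g]) (k, v) = gs ++ [g ++ [(k, v)]] := by
        simp only [pvBStep, hbk, Bool.false_eq_true, if_false]
        rw [List.dropLast_concat]
        congr 1
        simp
      rw [h1, h2]
      exact ih gs (g ++ [(k, v)])

-- the two parsing pipelines produce the same pair list
theorem pv_pairs_eq (ls : List String) :
    (((ls.map PySem.Str.strip).filter (fun l => l != "")).filter
        (fun l => PySem.Str.isIn ":" l)).map pvExtract
    = (ls.filter (fun line => PySem.Str.isIn ":" (PySem.Str.strip line))).map
        (fun line => pvExtract (PySem.Str.strip line)) := by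
  rw [List.filter_filter, List.filter_map, List.map_map]
  simp only [Function.comp_def]
  congr 1
  apply List.filter_congr
  intro line _
  by_cases h : PySem.Str.strip line = ""
  · rw [h]; decide
  · simp [h]

-- ===== VERDICT (by name: the statement is the Claim_ definition above) =====
theorem convert_text_to_json_spec : Claim_equal_convert_text_to_json := by
  intro raw _
  show convert_text_to_json raw = convert_text_to_json_alt raw
  simp only [convert_text_to_json, convert_text_to_json_alt]
  rw [PySem.List.foldl_if_eq_foldl_filter
      (p := fun l => PySem.Str.isIn ":" l)
      (f := fun acc x => pvStep acc (pvExtract x))]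
  rw [← List.foldl_map (f := pvExtract) (g := pvStep)]
  rw [PySem.List.foldl_append_if
      (p := fun line => PySem.Str.isIn ":" (PySem.Str.strip line))
      (f := fun line => pvExtract (PySem.Str.strip line))]
  rw [List.nil_append, ← pv_pairs_eq]
  have h := pv_group_eq
    ((((((PySem.Str.split? raw "\n").getD []).map PySem.Str.strip).filter
        (fun l => l != "")).filter (fun l => PySem.Str.isIn ":" l)).map pvExtract) [] []
  simpa [pvFinal, PySem.Dict.ofList, PySem.Dict.update] using h
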